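-- pv_equiv track=rewrite | github.com/pinocchio-life-like/leet_code | test_three.py | diffMatrix
-- ===== SOURCE A (Python) =====
-- def diffMatrix(grid):
--     m, n = len(grid), len(grid[0])
--     onesRow, onesCol = [0]*m, [0]*n
--     zerosRow, zerosCol = [0]*m, [0]*n
--
--     for i in range(m):
--         for j in range(n):
--             if grid[i][j] == 1:
--                 onesRow[i] += 1
--                 onesCol[j] += 1
--             else:
--                 zerosRow[i] += 1
--                 zerosCol[j] += 1
--
--     diff = [[0]*n for _ in range(m)]
--     for i in range(m):
--         for j in range(n):
--             diff[i][j] = onesRow[i] + onesCol[j] - zerosRow[i] - zerosCol[j]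
--
--     return diff
-- ===== SOURCE B (Python) =====
-- def diffMatrix(grid):
--     n = len(grid[0])
--
--     def score(x):
--         return 1 if x == 1 else -1
--
--     def go(rows, col):
--         # returns (column score totals, diff rows for `rows`)
--         if not rows:
--             return col, []
--         r = rows[0]
--         s = sum(score(x) for x in r[:n])
--         final, rest = go(rows[1:], [c + score(x) for c, x in zip(col, r)])
--         return final, [[s + c for c in final]] + rest
--
--     return go(grid, [0] * n)[1]
-- ===== Notes on version B (the rewrite author's own statement) =====
-- stated objective: alternative
-- what changed: B replaces A's two-stage four-count-array fill with a single structural recursion over the rows: each entry contributes a +/-1 score, a column-score accumulator is threaded down the recursion and the finished column totals flow back up while each output row is built on the unwind as rowScore + columnScore; no zeros arrays, no classification branch, no index loops, no second fill pass.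
import Mathlib
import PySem

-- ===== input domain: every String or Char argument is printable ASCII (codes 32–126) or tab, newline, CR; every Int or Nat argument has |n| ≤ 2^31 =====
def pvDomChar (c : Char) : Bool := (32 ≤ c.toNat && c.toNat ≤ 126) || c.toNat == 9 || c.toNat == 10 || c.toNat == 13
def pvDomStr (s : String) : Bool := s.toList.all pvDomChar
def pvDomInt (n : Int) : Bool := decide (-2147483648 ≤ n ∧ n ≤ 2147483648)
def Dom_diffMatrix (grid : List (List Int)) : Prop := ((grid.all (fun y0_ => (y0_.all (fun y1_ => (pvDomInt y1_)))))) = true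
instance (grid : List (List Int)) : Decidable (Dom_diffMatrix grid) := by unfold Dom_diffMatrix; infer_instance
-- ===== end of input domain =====

-- B replaces A's count-then-fill with one structural recursion over the rows, threading a
-- ±1 column-score accumulator down and building each output row on the unwind (alternative).

-- ===== PORT A =====
-- xs[i] += 1  (A only increments indices produced by range(m)/range(n), always in range)
def pvInc (xs : List Int) (i : Nat) : List Int := xs.set i (xs.getD i 0 + 1)

-- grid[i][j] == 1  (row access total via getD; in range under Pre_diffMatrix)
def pvCell (grid : List (List Int)) (i j : Nat) : Bool := (grid.getD i []).getD j 0 == 1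

-- the body of A's counting double loop, state (onesRow, onesCol, zerosRow, zerosCol)
def pvStep (grid : List (List Int)) (i : Nat)
    (s : List Int × List Int × List Int × List Int) (j : Nat) :
    List Int × List Int × List Int × List Int :=
  if pvCell grid i j then
    (pvInc s.1 i, pvInc s.2.1 j, s.2.2.1, s.2.2.2)
  else
    (s.1, s.2.1, pvInc s.2.2.1 i, pvInc s.2.2.2 j)

def diffMatrix (grid : List (List Int)) : List (List Int) :=
  let m := grid.length
  let n := ((PySem.List.pyGet? grid 0).getD []).length
  let st := (List.range m).foldl
      (fun s i => (List.range n).foldl (pvStep grid i) s)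
      (List.replicate m (0:Int), List.replicate n (0:Int),
       List.replicate m (0:Int), List.replicate n (0:Int))
  (List.range m).map (fun i => (List.range n).map (fun j =>
    st.1.getD i 0 + st.2.1.getD j 0 - st.2.2.1.getD i 0 - st.2.2.2.getD j 0))

-- ===== PORT B =====
-- score(x): 1 if x == 1 else -1
def pvScore (x : Int) : Int := if x == 1 then 1 else -1

-- [c + score(x) for c, x in zip(col, r)]
def pvAddCol (col : List Int) (r : List Int) : List Int :=
  (col.zip r).map (fun p => p.1 + pvScore p.2)

-- go(rows, col): thread the column accumulator down, build the diff rows on the unwind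
def pvGo (n : Nat) (rows : List (List Int)) (col : List Int) : List Int × List (List Int) :=
  match rows with
  | [] => (col, [])
  | r :: rest =>
      let s := ((r.take n).map pvScore).sum   -- sum(score(x) for x in r[:n])
      let fr := pvGo n rest (pvAddCol col r)
      (fr.1, (fr.1.map (fun c => s + c)) :: fr.2)

def diffMatrix_alt (grid : List (List Int)) : List (List Int) :=
  let n := ((PySem.List.pyGet? grid 0).getD []).length
  (pvGo n grid (List.replicate n (0:Int))).2

-- ===== PRECONDITION & SPEC =====
-- Pre_ excludes exactly the inputs on which the Python A raises IndexError: the empty grid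
-- (grid[0]) and grids with some row shorter than len(grid[0]) (grid[i][j] out of range).
def Pre_diffMatrix (grid : List (List Int)) : Prop :=
  grid ≠ [] ∧ ∀ row ∈ grid, ((PySem.List.pyGet? grid 0).getD []).length ≤ row.length
instance (grid : List (List Int)) : Decidable (Pre_diffMatrix grid) := by unfold Pre_diffMatrix; infer_instance

def pvWitness_diffMatrix : List (List Int) := [[1, 0], [0, 1]]

def Spec_diffMatrix (grid : List (List Int)) (out : List (List Int)) : Prop := out = diffMatrix_alt grid
instance (grid : List (List Int)) (out : List (List Int)) : Decidable (Spec_diffMatrix grid out) := by unfold Spec_diffMatrix; infer_instance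

-- ===== CLAIM (what is proved, stated in full; the proofs are below) =====
def Claim_equal_diffMatrix : Prop := ∀ (grid : List (List Int)), Dom_diffMatrix grid → Pre_diffMatrix grid → Spec_diffMatrix grid (diffMatrix grid)

-- ===== LEMMAS AND PROOFS =====

-- ones/zeros counts of row i over columns < n, and of column j over rows < m'
def rowCnt (grid : List (List Int)) (n i : Nat) : Nat := (List.range n).countP (pvCell grid i)
def zRowCnt (grid : List (List Int)) (n i : Nat) : Nat := (List.range n).countP (fun j => !pvCell grid i j)
def colCnt (grid : List (List Int)) (m' j : Nat) : Nat := (List.range m').countP (fun i => pvCell grid i j)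
def zColCnt (grid : List (List Int)) (m' j : Nat) : Nat := (List.range m').countP (fun i => !pvCell grid i j)

lemma countP_complement {α : Type} (l : List α) (p : α → Bool) :
    l.countP p + l.countP (fun a => !p a) = l.length := by
  induction l with
  | nil => simp
  | cons x xs ih => by_cases hx : p x <;> simp [hx] <;> omega

lemma cnt_take (row : List Int) (n : Nat) :
    (List.range n).countP (fun j => row.getD j 0 == 1) = (row.take n).countP (fun x => x == 1) := by
  induction row generalizing n with
  | nil => simp [List.getD]
  | cons x xs ih =>
    cases n with
    | zero => simp
    | succ k =>
      rw [List.range_succ_eq_map]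
      simp only [List.countP_cons, List.countP_map, Function.comp_def, List.getD,
        List.getElem?_cons_succ, List.getElem?_cons_zero, Option.getD_some, List.take_succ_cons]
      have : (List.range k).countP (fun j => (xs[j]?.getD 0 == 1)) = (xs.take k).countP (fun x => x == 1) := ih k
      rw [this]
      split_ifs <;> omega

lemma countP_range_getD (gs : List (List Int)) (p : List Int → Bool) :
    (List.range gs.length).countP (fun i => p (gs.getD i [])) = gs.countP p := by
  induction gs with
  | nil => simp
  | cons g gs ih =>
    rw [List.length_cons, List.range_succ_eq_map]
    simp only [List.countP_cons, List.countP_map, Function.comp_def, List.getD,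
      List.getElem?_cons_succ, List.getElem?_cons_zero, Option.getD_some]
    have : (List.range gs.length).countP (fun i => p (gs[i]?.getD [])) = gs.countP p := ih
    rw [this]
    split_ifs <;> omega

-- sum of ±1 scores of a list in terms of its ones count and length
lemma sum_score (l : List Int) :
    (l.map pvScore).sum = 2 * (l.countP (fun x => x == 1) : Int) - (l.length : Int) := by
  induction l with
  | nil => simp
  | cons x xs ih =>
    by_cases hx : x == 1 <;>
      simp [pvScore, hx, ih] <;> ring

lemma pvInc_length (xs : List Int) (i : Nat) : (pvInc xs i).length = xs.length := by
  simp [pvInc]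

lemma pvInc_getD (xs : List Int) (i k : Nat) (h : i < xs.length) :
    (pvInc xs i).getD k 0 = xs.getD k 0 + if k = i then 1 else 0 := by
  by_cases hk : k = i
  · subst hk; simp [pvInc, List.getD, h]
  · simp [pvInc, List.getD, List.getElem?_set_ne (by omega : i ≠ k), hk]

lemma inner_len (grid : List (List Int)) (i : Nat) (n : Nat)
    (s : List Int × List Int × List Int × List Int) :
    ((List.range n).foldl (pvStep grid i) s).1.length = s.1.length ∧
    ((List.range n).foldl (pvStep grid i) s).2.1.length = s.2.1.length ∧
    ((List.range n).foldl (pvStep grid i) s).2.2.1.length = s.2.2.1.length ∧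
    ((List.range n).foldl (pvStep grid i) s).2.2.2.length = s.2.2.2.length := by
  induction n with
  | zero => simp
  | succ n ih =>
    rw [List.range_succ, List.foldl_append]
    obtain ⟨h1, h2, h3, h4⟩ := ih
    by_cases hc : pvCell grid i n <;>
      simp [pvStep, hc, pvInc_length, h1, h2, h3, h4]

lemma pv_if_merge (a c b : Int) (k i : Nat) :
    a + (if k = i then c else 0) + (if k = i then b else 0) = a + if k = i then c + b else 0 := by
  split_ifs <;> omega

lemma pv_if_add (a : Int) (n k : Nat) (P : Nat → Bool) (hPn : P n = true) :
    a + (if k < n ∧ P k = true then 1 else 0) + (if k = n then 1 else 0)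
      = a + if k < n + 1 ∧ P k = true then 1 else 0 := by
  by_cases hk : k = n
  · subst hk; simp [hPn]
  · by_cases h3 : k < n <;> by_cases h4 : P k = true <;> simp [hk, h3, h4] <;> omega

lemma pv_if_same (a : Int) (n k : Nat) (P : Nat → Bool) (hPn : P n = false) :
    a + (if k < n ∧ P k = true then 1 else 0) = a + if k < n + 1 ∧ P k = true then 1 else 0 := by
  by_cases hk : k = n
  · subst hk; simp [hPn]
  · by_cases h3 : k < n <;> by_cases h4 : P k = true <;> simp [h3, h4] <;> omega

lemma pv_if_add_not (a : Int) (n k : Nat) (P : Nat → Bool) (hPn : P n = false) :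
    a + (if k < n ∧ ¬ P k = true then 1 else 0) + (if k = n then 1 else 0)
      = a + if k < n + 1 ∧ ¬ P k = true then 1 else 0 := by
  by_cases hk : k = n
  · subst hk; simp [hPn]
  · by_cases h3 : k < n <;> by_cases h4 : P k = true <;> simp [hk, h3, h4] <;> omega

lemma pv_if_same_not (a : Int) (n k : Nat) (P : Nat → Bool) (hPn : P n = true) :
    a + (if k < n ∧ ¬ P k = true then 1 else 0) = a + if k < n + 1 ∧ ¬ P k = true then 1 else 0 := by
  by_cases hk : k = n
  · subst hk; simp [hPn]
  · by_cases h3 : k < n <;> by_cases h4 : P k = true <;> simp [h3, h4] <;> omega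

lemma inner_spec (grid : List (List Int)) (i : Nat) (n : Nat)
    (s : List Int × List Int × List Int × List Int)
    (hi1 : i < s.1.length) (hi2 : i < s.2.2.1.length)
    (hC : n ≤ s.2.1.length) (hZ : n ≤ s.2.2.2.length) (k : Nat) :
    (((List.range n).foldl (pvStep grid i) s).1.getD k 0
        = s.1.getD k 0 + if k = i then (rowCnt grid n i : Int) else 0) ∧
    (((List.range n).foldl (pvStep grid i) s).2.1.getD k 0
        = s.2.1.getD k 0 + if k < n ∧ pvCell grid i k then 1 else 0) ∧
    (((List.range n).foldl (pvStep grid i) s).2.2.1.getD k 0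
        = s.2.2.1.getD k 0 + if k = i then (zRowCnt grid n i : Int) else 0) ∧
    (((List.range n).foldl (pvStep grid i) s).2.2.2.getD k 0
        = s.2.2.2.getD k 0 + if k < n ∧ ¬ pvCell grid i k then 1 else 0) := by
  induction n with
  | zero => simp [rowCnt, zRowCnt]
  | succ n ih =>
    have hC' : n ≤ s.2.1.length := by omega
    have hZ' : n ≤ s.2.2.2.length := by omega
    obtain ⟨ih1, ih2, ih3, ih4⟩ := ih hC' hZ'
    obtain ⟨l1, l2, l3, l4⟩ := inner_len grid i n s
    have hrc : (rowCnt grid (n+1) i : Int) = rowCnt grid n i + if pvCell grid i n then 1 else 0 := by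
      by_cases hc : pvCell grid i n <;>
        simp [rowCnt, List.range_succ, List.countP_append, hc]
    have hzc : (zRowCnt grid (n+1) i : Int) = zRowCnt grid n i + if pvCell grid i n then 0 else 1 := by
      by_cases hc : pvCell grid i n <;>
        simp [zRowCnt, List.range_succ, List.countP_append, hc]
    rw [List.range_succ, List.foldl_append]
    simp only [List.foldl_cons, List.foldl_nil]
    by_cases hc : pvCell grid i n
    · have hrcP : (rowCnt grid (n+1) i : Int) = (rowCnt grid n i : Int) + 1 := by
        rw [hrc, if_pos hc]
      have hzcP : (zRowCnt grid (n+1) i : Int) = (zRowCnt grid n i : Int) := by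
        rw [hzc, if_pos hc, add_zero]
      simp only [pvStep, hc, if_true]
      refine ⟨?_, ?_, ?_, ?_⟩
      · rw [pvInc_getD _ _ _ (by omega : i < _), ih1, hrcP]
        exact pv_if_merge _ _ 1 k i
      · rw [pvInc_getD _ _ _ (by omega : n < _), ih2]
        exact pv_if_add _ n k (pvCell grid i) hc
      · rw [ih3, hzcP]
      · rw [ih4]
        exact pv_if_same_not _ n k (pvCell grid i) hc
    · have hc' : pvCell grid i n = false := by simpa using hc
      have hrcN : (rowCnt grid (n+1) i : Int) = (rowCnt grid n i : Int) := by
        rw [hrc, hc']; simp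
      have hzcN : (zRowCnt grid (n+1) i : Int) = (zRowCnt grid n i : Int) + 1 := by
        rw [hzc, hc']; simp
      simp only [pvStep, hc', Bool.false_eq_true, if_false]
      refine ⟨?_, ?_, ?_, ?_⟩
      · rw [ih1, hrcN]
      · rw [ih2]
        exact pv_if_same _ n k (pvCell grid i) hc'
      · rw [pvInc_getD _ _ _ (by omega : i < _), ih3, hzcN]
        exact pv_if_merge _ _ 1 k i
      · rw [pvInc_getD _ _ _ (by omega : n < _), ih4]
        exact pv_if_add_not _ n k (pvCell grid i) hc'

lemma outer_spec (grid : List (List Int)) (m n : Nat) (m' : Nat) (hm : m' ≤ m) :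
    (((List.range m').foldl (fun s i => (List.range n).foldl (pvStep grid i) s)
      (List.replicate m (0:Int), List.replicate n (0:Int),
       List.replicate m (0:Int), List.replicate n (0:Int))).1.length = m ∧
     ((List.range m').foldl (fun s i => (List.range n).foldl (pvStep grid i) s)
      (List.replicate m (0:Int), List.replicate n (0:Int),
       List.replicate m (0:Int), List.replicate n (0:Int))).2.1.length = n ∧
     ((List.range m').foldl (fun s i => (List.range n).foldl (pvStep grid i) s)
      (List.replicate m (0:Int), List.replicate n (0:Int),
       List.replicate m (0:Int), List.replicate n (0:Int))).2.2.1.length = m ∧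
     ((List.range m').foldl (fun s i => (List.range n).foldl (pvStep grid i) s)
      (List.replicate m (0:Int), List.replicate n (0:Int),
       List.replicate m (0:Int), List.replicate n (0:Int))).2.2.2.length = n) ∧
    ∀ k,
    (((List.range m').foldl (fun s i => (List.range n).foldl (pvStep grid i) s)
      (List.replicate m (0:Int), List.replicate n (0:Int),
       List.replicate m (0:Int), List.replicate n (0:Int))).1.getD k 0
        = if k < m' then (rowCnt grid n k : Int) else 0) ∧
    (((List.range m').foldl (fun s i => (List.range n).foldl (pvStep grid i) s)
      (List.replicate m (0:Int), List.replicate n (0:Int),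
       List.replicate m (0:Int), List.replicate n (0:Int))).2.1.getD k 0
        = if k < n then (colCnt grid m' k : Int) else 0) ∧
    (((List.range m').foldl (fun s i => (List.range n).foldl (pvStep grid i) s)
      (List.replicate m (0:Int), List.replicate n (0:Int),
       List.replicate m (0:Int), List.replicate n (0:Int))).2.2.1.getD k 0
        = if k < m' then (zRowCnt grid n k : Int) else 0) ∧
    (((List.range m').foldl (fun s i => (List.range n).foldl (pvStep grid i) s)
      (List.replicate m (0:Int), List.replicate n (0:Int),
       List.replicate m (0:Int), List.replicate n (0:Int))).2.2.2.getD k 0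
        = if k < n then (zColCnt grid m' k : Int) else 0) := by
  induction m' with
  | zero =>
    refine ⟨⟨by simp, by simp, by simp, by simp⟩, fun k => ⟨?_, ?_, ?_, ?_⟩⟩ <;>
      simp [colCnt, zColCnt, List.getD]
  | succ m' ih =>
    have hm' : m' ≤ m := by omega
    obtain ⟨⟨L1, L2, L3, L4⟩, hK⟩ := ih hm'
    rw [List.range_succ, List.foldl_append, List.foldl_cons, List.foldl_nil]
    obtain ⟨l1, l2, l3, l4⟩ := inner_len grid m' n
      ((List.range m').foldl (fun s i => (List.range n).foldl (pvStep grid i) s)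
        (List.replicate m (0:Int), List.replicate n (0:Int),
         List.replicate m (0:Int), List.replicate n (0:Int)))
    refine ⟨⟨by rw [l1, L1], by rw [l2, L2], by rw [l3, L3], by rw [l4, L4]⟩, fun k => ?_⟩
    obtain ⟨i1, i2, i3, i4⟩ := inner_spec grid m' n
      ((List.range m').foldl (fun s i => (List.range n).foldl (pvStep grid i) s)
        (List.replicate m (0:Int), List.replicate n (0:Int),
         List.replicate m (0:Int), List.replicate n (0:Int)))
      (by omega) (by omega) (by omega) (by omega) k
    obtain ⟨h1, h2, h3, h4⟩ := hK k
    have hcs : (colCnt grid (m'+1) k : Int) = colCnt grid m' k + if pvCell grid m' k then 1 else 0 := by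
      by_cases hc : pvCell grid m' k <;>
        simp [colCnt, List.range_succ, List.countP_append, hc]
    have hzs : (zColCnt grid (m'+1) k : Int) = zColCnt grid m' k + if pvCell grid m' k then 0 else 1 := by
      by_cases hc : pvCell grid m' k <;>
        simp [zColCnt, List.range_succ, List.countP_append, hc]
    refine ⟨?_, ?_, ?_, ?_⟩
    · rw [i1, h1]
      by_cases hk : k = m'
      · subst hk; simp
      · simp only [hk, if_false]
        split_ifs <;> omega
    · rw [i2, h2]
      by_cases hn : k < n <;> by_cases hc : pvCell grid m' k <;>
        simp [hn, hc, hcs]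
    · rw [i3, h3]
      by_cases hk : k = m'
      · subst hk; simp
      · simp only [hk, if_false]
        split_ifs <;> omega
    · rw [i4, h4]
      by_cases hn : k < n <;> by_cases hc : pvCell grid m' k <;>
        simp [hn, hc, hzs]

lemma pvGo_fst (n : Nat) (rows : List (List Int)) (col : List Int) :
    (pvGo n rows col).1 = rows.foldl pvAddCol col := by
  induction rows generalizing col with
  | nil => rfl
  | cons r rest ih => simp [pvGo, ih]

lemma pvGo_snd (n : Nat) (rows : List (List Int)) (col : List Int) :
    (pvGo n rows col).2 = rows.map (fun r =>
      (rows.foldl pvAddCol col).map (fun c => ((r.take n).map pvScore).sum + c)) := by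
  induction rows generalizing col with
  | nil => rfl
  | cons r rest ih =>
    simp [pvGo, ih, pvGo_fst]

lemma addCol_length (col r : List Int) : (pvAddCol col r).length = min col.length r.length := by
  simp [pvAddCol]

lemma foldl_addCol_length (rows : List (List Int)) (col : List Int)
    (h : ∀ r ∈ rows, col.length ≤ r.length) :
    (rows.foldl pvAddCol col).length = col.length := by
  induction rows generalizing col with
  | nil => rfl
  | cons r rest ih =>
    have hr : col.length ≤ r.length := h r (by simp)
    have hlen : (pvAddCol col r).length = col.length := by
      rw [addCol_length]; omega
    rw [List.foldl_cons, ih (pvAddCol col r) (fun r' hr' => by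
      rw [hlen]; exact h r' (by simp [hr']))]
    exact hlen

lemma addCol_getD (col r : List Int) (j : Nat) (hj : j < col.length) (hr : col.length ≤ r.length) :
    (pvAddCol col r).getD j 0 = col.getD j 0 + pvScore (r.getD j 0) := by
  have h1 : j < (pvAddCol col r).length := by rw [addCol_length]; omega
  have h2 : j < (col.zip r).length := by simp; omega
  have hjr : j < r.length := by omega
  simp [pvAddCol, List.getD, hj, hjr]

lemma foldl_addCol_getD (rows : List (List Int)) (col : List Int) (j : Nat)
    (hj : j < col.length) (h : ∀ r ∈ rows, col.length ≤ r.length) :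
    (rows.foldl pvAddCol col).getD j 0
      = col.getD j 0 + (rows.map (fun r => pvScore (r.getD j 0))).sum := by
  induction rows generalizing col with
  | nil => simp
  | cons r rest ih =>
    have hr : col.length ≤ r.length := h r (by simp)
    have hlen : (pvAddCol col r).length = col.length := by
      rw [addCol_length]; omega
    rw [List.foldl_cons, ih (pvAddCol col r) (by omega)
        (fun r' hr' => by rw [hlen]; exact h r' (by simp [hr'])),
      addCol_getD col r j hj hr]
    simp [add_assoc]

lemma ports_eq (grid : List (List Int)) (hpre : Pre_diffMatrix grid) :
    diffMatrix grid = diffMatrix_alt grid := by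
  obtain ⟨hne, hrows⟩ := hpre
  unfold diffMatrix diffMatrix_alt
  set n := ((PySem.List.pyGet? grid 0).getD []).length with hn
  have hcol : ∀ r ∈ grid, (List.replicate n (0:Int)).length ≤ r.length := by
    intro r hr; rw [List.length_replicate]; exact hrows r hr
  have hF : (grid.foldl pvAddCol (List.replicate n (0:Int))).length = n := by
    rw [foldl_addCol_length grid _ hcol, List.length_replicate]
  rw [pvGo_snd]
  apply List.ext_getElem (by simp)
  intro i h1 h2
  rw [List.length_map] at h2
  have hi : i < grid.length := h2
  simp only [List.getElem_map, List.getElem_range]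
  apply List.ext_getElem (by simp [hF])
  intro j hj1 hj2
  rw [List.length_map, List.length_range] at hj1
  simp only [List.getElem_map, List.getElem_range]
  obtain ⟨-, hK⟩ := outer_spec grid grid.length n grid.length (le_refl _)
  obtain ⟨a1, -, a3, -⟩ := hK i
  obtain ⟨-, a2, -, a4⟩ := hK j
  rw [a1, a2, a3, a4, if_pos hi, if_pos hj1, if_pos hi, if_pos hj1]
  have hFj : (grid.foldl pvAddCol (List.replicate n (0:Int)))[j]
      = 0 + (grid.map (fun r => pvScore (r.getD j 0))).sum := by
    have := foldl_addCol_getD grid (List.replicate n (0:Int)) j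
      (by rw [List.length_replicate]; exact hj1) hcol
    rw [List.getD_eq_getElem _ 0 (by omega)] at this
    rw [this]; simp
  have hcolsum : (grid.map (fun r => pvScore (r.getD j 0))).sum
      = ((grid.map (fun r => r.getD j 0)).map pvScore).sum := by
    rw [List.map_map]; rfl
  have hrow : grid[i] = grid.getD i [] := by simp [List.getD, hi]
  have hmem : grid.getD i [] ∈ grid := by
    rw [← hrow]; exact List.getElem_mem hi
  have hlen : n ≤ (grid.getD i []).length := hrows _ hmem
  rw [hFj, hcolsum, hrow, sum_score, sum_score]
  rw [List.length_take_of_le hlen, List.length_map]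
  have hctake : ((grid.getD i []).take n).countP (fun x => x == 1) = rowCnt grid n i := by
    rw [← cnt_take]; rfl
  have hcol2 : (grid.map (fun r => r.getD j 0)).countP (fun x => x == 1) = colCnt grid grid.length j := by
    rw [List.countP_map]
    have : ((fun x => x == 1) ∘ fun (r : List Int) => r.getD j 0) = (fun r => r.getD j 0 == 1) := rfl
    rw [this, ← countP_range_getD grid (fun r => r.getD j 0 == 1)]; rfl
  rw [hctake, hcol2]
  have hZR := countP_complement (List.range n) (pvCell grid i)
  have hZC := countP_complement (List.range grid.length) (fun i => pvCell grid i j)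
  rw [List.length_range] at hZR hZC
  simp only [rowCnt, zRowCnt, colCnt, zColCnt] at hZR hZC ⊢
  omega

-- ===== VERDICT (by name: the statement is the Claim_ definition above) =====
theorem diffMatrix_spec : Claim_equal_diffMatrix := by
  intro grid _ hpre
  unfold Spec_diffMatrix
  exact ports_eq grid hpre
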